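-- pv_equiv track=rewrite | github.com/GozerAI/sentinel | src/sentinel/agents/discovery.py | _lldp_capabilities_to_node_type
-- ===== SOURCE A (Python) =====
-- def _lldp_capabilities_to_node_type(capabilities: list, description: str = "") -> str:
--     """Convert LLDP capability flags to topology node type."""
--     cap_lower = [c.lower() for c in capabilities] if capabilities else []
--     desc_lower = description.lower() if description else ""
--
--     # Check capabilities first
--     if "router" in cap_lower:
--         return "router"
--     if "bridge" in cap_lower or "switch" in cap_lower:
--         return "switch"
--     if "wlan" in cap_lower or "access point" in cap_lower:
--         return "access_point"
--     if "telephone" in cap_lower or "voip" in cap_lower: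
--         return "voip_phone"
--
--     # Fall back to description parsing
--     if "router" in desc_lower:
--         return "router"
--     if "switch" in desc_lower:
--         return "switch"
--     if "access point" in desc_lower or "ap" in desc_lower:
--         return "access_point"
--
--     return "endpoint"
-- ===== SOURCE B (Python) =====
-- # Priority-score re-implementation: instead of testing rules against the input,
-- # scan the INPUT once, rating each capability via a keyword->(priority, type)
-- # dict and keeping the minimum-priority hit; same min-fold over the description
-- # keywords. The per-rule membership scans of the original disappear.
-- _CAP_PRIO = {
--     "router": (0, "router"),
--     "bridge": (1, "switch"),
--     "switch": (1, "switch"),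
--     "wlan": (2, "access_point"),
--     "access point": (2, "access_point"),
--     "telephone": (3, "voip_phone"),
--     "voip": (3, "voip_phone"),
-- }
-- _DESC_PRIO = [
--     (0, "router", "router"),
--     (1, "switch", "switch"),
--     (2, "access point", "access_point"),
--     (2, "ap", "access_point"),
-- ]
--
-- def _lldp_capabilities_to_node_type(capabilities: list, description: str = "") -> str:
--     best = None
--     for c in capabilities:
--         hit = _CAP_PRIO.get(c.lower())
--         if hit is not None and (best is None or hit[0] < best[0]):
--             best = hit
--     if best is not None:
--         return best[1]
--     desc_lower = description.lower()
--     for prio, kw, typ in _DESC_PRIO: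
--         if kw in desc_lower and (best is None or prio < best[0]):
--             best = (prio, typ)
--     return best[1] if best is not None else "endpoint"
-- ===== Notes on version B (the rewrite author's own statement) =====
-- stated objective: alternative
-- what changed: Replaced the ordered if/elif rule chain (each rule scanning the capability list) by a single pass over the input capabilities with a keyword->(priority,type) dict lookup per item, keeping the minimum-priority hit, and the same min-fold over description keywords.
import Mathlib
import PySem

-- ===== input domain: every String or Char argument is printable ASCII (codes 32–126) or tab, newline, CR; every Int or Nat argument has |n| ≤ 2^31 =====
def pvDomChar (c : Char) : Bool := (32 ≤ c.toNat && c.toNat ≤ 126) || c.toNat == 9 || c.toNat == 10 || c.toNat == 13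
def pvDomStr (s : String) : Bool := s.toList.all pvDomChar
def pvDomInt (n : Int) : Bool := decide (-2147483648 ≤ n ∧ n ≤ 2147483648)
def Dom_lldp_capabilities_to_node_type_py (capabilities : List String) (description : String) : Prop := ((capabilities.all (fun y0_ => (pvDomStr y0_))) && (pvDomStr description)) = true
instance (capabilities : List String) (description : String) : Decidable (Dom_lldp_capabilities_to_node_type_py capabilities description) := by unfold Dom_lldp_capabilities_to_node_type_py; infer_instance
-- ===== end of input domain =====

-- B replaces A's if/elif rule chain (each rule scanning the capability list) by one pass
-- over the input itself: each capability is rated through a keyword->(priority,type) dict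
-- and the minimum-priority hit wins; the description keywords are min-folded the same way.

-- ===== PORT A =====
def lldp_capabilities_to_node_type_py (capabilities : List String) (description : String) : String :=
  let cap_lower : List String := if capabilities ≠ [] then capabilities.map PySem.Str.lower else []
  let desc_lower : String := if description ≠ "" then PySem.Str.lower description else ""
  if cap_lower.contains "router" then "router"
  else if cap_lower.contains "bridge" || cap_lower.contains "switch" then "switch"
  else if cap_lower.contains "wlan" || cap_lower.contains "access point" then "access_point"
  else if cap_lower.contains "telephone" || cap_lower.contains "voip" then "voip_phone"
  else if PySem.Str.isIn "router" desc_lower then "router"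
  else if PySem.Str.isIn "switch" desc_lower then "switch"
  else if PySem.Str.isIn "access point" desc_lower || PySem.Str.isIn "ap" desc_lower then "access_point"
  else "endpoint"

-- ===== PORT B =====
def pvCapPrio : PySem.Dict String (Nat × String) :=
  PySem.Dict.ofList
    [("router", (0, "router")), ("bridge", (1, "switch")), ("switch", (1, "switch")),
     ("wlan", (2, "access_point")), ("access point", (2, "access_point")),
     ("telephone", (3, "voip_phone")), ("voip", (3, "voip_phone"))]

def pvDescPrio : List (Nat × String × String) :=
  [(0, "router", "router"), (1, "switch", "switch"),
   (2, "access point", "access_point"), (2, "ap", "access_point")]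

def pvCapStep (best : Option (Nat × String)) (c : String) : Option (Nat × String) :=
  match PySem.Dict.get? pvCapPrio (PySem.Str.lower c) with
  | none => best
  | some hit =>
    match best with
    | none => some hit
    | some b => if hit.1 < b.1 then some hit else best

def pvDescStep (descLower : String) (best : Option (Nat × String)) (r : Nat × String × String) : Option (Nat × String) :=
  if PySem.Str.isIn r.2.1 descLower && (match best with | none => true | some b => decide (r.1 < b.1))
  then some (r.1, r.2.2) else best

def lldp_capabilities_to_node_type_py_alt (capabilities : List String) (description : String) : String :=
  match capabilities.foldl pvCapStep none with
  | some b => b.2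
  | none =>
    let descLower := PySem.Str.lower description
    match pvDescPrio.foldl (pvDescStep descLower) none with
    | some b => b.2
    | none => "endpoint"

-- ===== PRECONDITION & SPEC =====
def Spec_lldp_capabilities_to_node_type_py (capabilities : List String) (description : String) (out : String) : Prop := out = lldp_capabilities_to_node_type_py_alt capabilities description
instance (capabilities : List String) (description : String) (out : String) : Decidable (Spec_lldp_capabilities_to_node_type_py capabilities description out) := by unfold Spec_lldp_capabilities_to_node_type_py; infer_instance

-- ===== CLAIM (what is proved, stated in full; the proofs are below) =====
def Claim_equal_lldp_capabilities_to_node_type_py : Prop := ∀ (capabilities : List String) (description : String), Dom_lldp_capabilities_to_node_type_py capabilities description → Spec_lldp_capabilities_to_node_type_py capabilities description (lldp_capabilities_to_node_type_py capabilities description)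

-- ===== LEMMAS AND PROOFS =====

-- lookup on the lowered string, as pvCapStep uses it
def pvLookup (x : String) : Option (Nat × String) := PySem.Dict.get? pvCapPrio x

def pvStep2 (best : Option (Nat × String)) (x : String) : Option (Nat × String) :=
  match pvLookup x with
  | none => best
  | some hit =>
    match best with
    | none => some hit
    | some b => if hit.1 < b.1 then some hit else best

-- left-biased minimum on priority
def pvBestOf : Option (Nat × String) → Option (Nat × String) → Option (Nat × String)
  | a, none => a
  | none, some h => some h
  | some b, some h => if h.1 < b.1 then some h else some b

-- what A's capability chain computes on the lowered list
def pvChain (L : List String) : Option (Nat × String) :=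
  if L.contains "router" then some (0, "router")
  else if L.contains "bridge" || L.contains "switch" then some (1, "switch")
  else if L.contains "wlan" || L.contains "access point" then some (2, "access_point")
  else if L.contains "telephone" || L.contains "voip" then some (3, "voip_phone")
  else none

theorem pvStep2_eq_bestOf (acc : Option (Nat × String)) (x : String) :
    pvStep2 acc x = pvBestOf acc (pvLookup x) := by
  unfold pvStep2 pvBestOf
  cases pvLookup x <;> cases acc <;> simp

theorem pvBestOf_assoc (a h c : Option (Nat × String)) :
    pvBestOf (pvBestOf a h) c = pvBestOf a (pvBestOf h c) := by
  cases a <;> cases h <;> cases c <;> simp only [pvBestOf] <;> split_ifs <;>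
    simp only [pvBestOf] <;> split_ifs <;> first | rfl | omega

theorem pvBestOf_none (o : Option (Nat × String)) : pvBestOf none o = o := by
  cases o <;> rfl

theorem pvChain_cons (x : String) (L : List String) :
    pvChain (x :: L) = pvBestOf (pvLookup x) (pvChain L) := by
  by_cases h1 : x = "router"
  · subst h1; rw [show pvLookup "router" = some (0, "router") from rfl]
    simp [pvChain]; split_ifs <;> simp_all [pvBestOf]
  by_cases h2 : x = "bridge"
  · subst h2; rw [show pvLookup "bridge" = some (1, "switch") from rfl]
    simp [pvChain]; split_ifs <;> simp_all [pvBestOf]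
  by_cases h3 : x = "switch"
  · subst h3; rw [show pvLookup "switch" = some (1, "switch") from rfl]
    simp [pvChain]; split_ifs <;> simp_all [pvBestOf]
  by_cases h4 : x = "wlan"
  · subst h4; rw [show pvLookup "wlan" = some (2, "access_point") from rfl]
    simp [pvChain]; split_ifs <;> simp_all [pvBestOf]
  by_cases h5 : x = "access point"
  · subst h5; rw [show pvLookup "access point" = some (2, "access_point") from rfl]
    simp [pvChain]; split_ifs <;> simp_all [pvBestOf]
  by_cases h6 : x = "telephone"
  · subst h6; rw [show pvLookup "telephone" = some (3, "voip_phone") from rfl]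
    simp [pvChain]; split_ifs <;> simp_all [pvBestOf]
  by_cases h7 : x = "voip"
  · subst h7; rw [show pvLookup "voip" = some (3, "voip_phone") from rfl]
    simp [pvChain]; split_ifs <;> simp_all [pvBestOf]
  · have hlk : pvLookup x = none := by
      rw [pvLookup, PySem.Dict.get?_eq_none_iff_not_mem_keys]
      rw [show pvCapPrio.keys = ["router", "bridge", "switch", "wlan", "access point", "telephone", "voip"] from rfl]
      simp [h1, h2, h3, h4, h5, h6, h7]
    rw [hlk, pvBestOf_none]
    simp [pvChain, List.mem_cons, Ne.symm h1, Ne.symm h2, Ne.symm h3, Ne.symm h4,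
      Ne.symm h5, Ne.symm h6, Ne.symm h7]

theorem pvFold (L : List String) (acc : Option (Nat × String)) :
    L.foldl pvStep2 acc = pvBestOf acc (pvChain L) := by
  induction L generalizing acc with
  | nil => cases acc <;> simp [pvChain, pvBestOf]
  | cons x L ih =>
    rw [List.foldl_cons, ih, pvStep2_eq_bestOf, pvBestOf_assoc, ← pvChain_cons]

theorem pvMainLemma (capabilities : List String) (description : String) :
    lldp_capabilities_to_node_type_py capabilities description =
      lldp_capabilities_to_node_type_py_alt capabilities description := by
  unfold lldp_capabilities_to_node_type_py lldp_capabilities_to_node_type_py_alt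
  have hcap : (if capabilities ≠ [] then capabilities.map PySem.Str.lower else []) =
      capabilities.map PySem.Str.lower := by
    cases capabilities <;> simp
  have hdesc : (if description ≠ "" then PySem.Str.lower description else "") =
      PySem.Str.lower description := by
    by_cases h : description = "" <;> simp [h] <;> rfl
  have hfold : capabilities.foldl pvCapStep none =
      pvChain (capabilities.map PySem.Str.lower) := by
    have hmap : capabilities.foldl pvCapStep none =
        (capabilities.map PySem.Str.lower).foldl pvStep2 none := by
      rw [List.foldl_map]; rfl
    rw [hmap, pvFold, pvBestOf_none]
  simp only [hcap, hdesc, hfold]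
  unfold pvChain
  split_ifs <;> try rfl
  all_goals simp only [pvDescPrio, List.foldl_cons, List.foldl_nil]
  all_goals (by_cases hd3 : PySem.Str.isIn "access point" (PySem.Str.lower description) <;>
    by_cases hd4 : PySem.Str.isIn "ap" (PySem.Str.lower description) <;>
    simp_all [pvDescStep])

-- ===== VERDICT (by name: the statement is the Claim_ definition above) =====
theorem lldp_capabilities_to_node_type_py_spec : Claim_equal_lldp_capabilities_to_node_type_py := by
  intro capabilities description _
  unfold Spec_lldp_capabilities_to_node_type_py
  exact pvMainLemma capabilities description
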